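-- pv_equiv track=rewrite | github.com/tonypal12/Python-Passworld- | Python Εργασία γραφικά.py | check_password_criteria
-- ===== SOURCE A (Python) =====
-- import string
--
-- def check_password_criteria(password):
--     if len(password) < 12:
--         return "Weak: Password should be at least 12 characters long."
--     elif not any(char.isdigit() for char in password):
--         return "Weak: Password should contain at least one digit."
--     elif not any(char.isalpha() for char in password):
--         return "Weak: Password should contain at least one letter."
--     elif not any(char.isupper() for char in password):
--         return "Weak: Password should contain at least one uppercase letter."
--     elif not any(char in string.punctuation for char in password):
--         return "Weak: Password should contain at least one special character."
--     else:
--         return "Strong: Password meets the criteria."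
-- ===== SOURCE B (Python) =====
-- import string
--
-- def check_password_criteria(password):
--     # Single pass: accumulate length and all four feature flags at once,
--     # then decide the message from the accumulated state.
--     n = 0
--     has_digit = has_alpha = has_upper = has_punct = False
--     for ch in password:
--         n += 1
--         has_digit = has_digit or ch.isdigit()
--         has_alpha = has_alpha or ch.isalpha()
--         has_upper = has_upper or ch.isupper()
--         has_punct = has_punct or (ch in string.punctuation)
--     if n < 12:
--         return "Weak: Password should be at least 12 characters long."
--     if not has_digit:
--         return "Weak: Password should contain at least one digit."
--     if not has_alpha:
--         return "Weak: Password should contain at least one letter."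
--     if not has_upper:
--         return "Weak: Password should contain at least one uppercase letter."
--     if not has_punct:
--         return "Weak: Password should contain at least one special character."
--     return "Strong: Password meets the criteria."
-- ===== Notes on version B (the rewrite author's own statement) =====
-- stated objective: alternative
-- what changed: Replaced A's five staged scans (length check plus four separate any(...) passes chosen by an if/elif chain) with one single pass over the password that accumulates the length and all four feature flags, then decides the message from that accumulated state.
import Mathlib
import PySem

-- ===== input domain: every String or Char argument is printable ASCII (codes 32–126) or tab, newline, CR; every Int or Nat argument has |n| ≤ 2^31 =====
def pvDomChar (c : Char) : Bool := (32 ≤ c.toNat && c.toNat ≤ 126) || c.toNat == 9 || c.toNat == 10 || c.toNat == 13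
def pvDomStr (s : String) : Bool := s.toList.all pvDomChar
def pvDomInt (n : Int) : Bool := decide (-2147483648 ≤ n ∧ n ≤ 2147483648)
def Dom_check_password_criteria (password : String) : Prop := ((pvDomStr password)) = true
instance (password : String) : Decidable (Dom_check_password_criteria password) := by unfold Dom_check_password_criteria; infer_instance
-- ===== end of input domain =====

-- B replaces A's five staged scans by ONE pass accumulating length and all four feature flags, then decides from that state.

-- string.punctuation
def pvPunctuation : List Char := "!\"#$%&'()*+,-./:;<=>?@[\\]^_`{|}~".toList

-- ===== PORT A =====
def check_password_criteria (password : String) : String :=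
  if PySem.Str.len password < 12 then
    "Weak: Password should be at least 12 characters long."
  else if !(password.toList.any (fun c => PySem.Chars.isdigit c)) then
    "Weak: Password should contain at least one digit."
  else if !(password.toList.any (fun c => PySem.Chars.isalpha c)) then
    "Weak: Password should contain at least one letter."
  else if !(password.toList.any (fun c => PySem.Chars.isupper c)) then
    "Weak: Password should contain at least one uppercase letter."
  else if !(password.toList.any (fun c => pvPunctuation.contains c)) then
    "Weak: Password should contain at least one special character."
  else
    "Strong: Password meets the criteria."

-- ===== PORT B =====
-- single-pass accumulator: (n, has_digit, has_alpha, has_upper, has_punct)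
def pvScanStep (st : Int × Bool × Bool × Bool × Bool) (ch : Char) :
    Int × Bool × Bool × Bool × Bool :=
  (st.1 + 1,
   st.2.1 || PySem.Chars.isdigit ch,
   st.2.2.1 || PySem.Chars.isalpha ch,
   st.2.2.2.1 || PySem.Chars.isupper ch,
   st.2.2.2.2 || pvPunctuation.contains ch)

def check_password_criteria_alt (password : String) : String :=
  let st := password.toList.foldl pvScanStep (0, false, false, false, false)
  if st.1 < 12 then
    "Weak: Password should be at least 12 characters long."
  else if !st.2.1 then
    "Weak: Password should contain at least one digit."
  else if !st.2.2.1 then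
    "Weak: Password should contain at least one letter."
  else if !st.2.2.2.1 then
    "Weak: Password should contain at least one uppercase letter."
  else if !st.2.2.2.2 then
    "Weak: Password should contain at least one special character."
  else
    "Strong: Password meets the criteria."

-- ===== PRECONDITION & SPEC =====
def Spec_check_password_criteria (password : String) (out : String) : Prop := out = check_password_criteria_alt password
instance (password : String) (out : String) : Decidable (Spec_check_password_criteria password out) := by unfold Spec_check_password_criteria; infer_instance

-- ===== CLAIM =====
def Claim_equal_check_password_criteria : Prop := ∀ (password : String), Dom_check_password_criteria password → Spec_check_password_criteria password (check_password_criteria password)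

-- ===== LEMMAS AND PROOFS =====
theorem pvScan_spec (l : List Char) (n : Int) (d a u s : Bool) :
    l.foldl pvScanStep (n, d, a, u, s) =
      (n + l.length,
       d || l.any (fun c => PySem.Chars.isdigit c),
       a || l.any (fun c => PySem.Chars.isalpha c),
       u || l.any (fun c => PySem.Chars.isupper c),
       s || l.any (fun c => pvPunctuation.contains c)) := by
  induction l generalizing n d a u s with
  | nil => simp
  | cons c t ih =>
      simp [pvScanStep, ih, Bool.or_assoc]
      omega

-- ===== VERDICT =====
theorem check_password_criteria_spec : Claim_equal_check_password_criteria := by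
  intro password _
  unfold Spec_check_password_criteria check_password_criteria check_password_criteria_alt
  rw [pvScan_spec]
  simp [PySem.Str.len]
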